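-- pv_equiv track=rewrite | github.com/FrenchCommando/advent_of_code | 2022/day22.py | next_right
-- ===== SOURCE A (Python) =====
-- def next_right(one_line):
--     out = [-1 for i in one_line]
--     left_index = -1
--     for i, c in enumerate(one_line):
--         if c == ' ':
--             left_index = -1
--         elif c == '.':
--             if left_index == -1:
--                 left_index = i
--             if i + 1 == len(one_line):
--                 next_char_wrap = one_line[left_index]
--                 if next_char_wrap == '.':
--                     out[i] = left_index
--                 elif next_char_wrap == '#':
--                     out[i] = i
--             else:
--                 next_char = one_line[i + 1]
--                 if next_char == '.':
--                     out[i] = i + 1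
--                 elif next_char == ' ':
--                     next_char_wrap = one_line[left_index]
--                     if next_char_wrap == '.':
--                         out[i] = left_index
--                     elif next_char_wrap == '#':
--                         out[i] = i
--                 else:
--                     out[i] = i
--         elif c == '#':
--             if left_index == -1:
--                 left_index = i
--     return out
-- ===== SOURCE B (Python) =====
-- # Two-pass segment-based reimplementation: pass 1 collects (start, end) segments,
-- # pass 2 fills the right-neighbour indices per segment.
-- def next_right(one_line):
--     n = len(one_line)
--     # pass 1: a segment starts at the first '.'/'#' after a space (or line start)
--     # and ends at the next space (exclusive) or the line end
--     segments = []
--     start = None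
--     for i, c in enumerate(one_line):
--         if c == ' ':
--             if start is not None:
--                 segments.append((start, i))
--                 start = None
--         elif start is None and (c == '.' or c == '#'):
--             start = i
--     if start is not None:
--         segments.append((start, n))
--     # pass 2: fill each segment's '.' cells
--     out = [-1] * n
--     for start, end in segments:
--         for i in range(start, end):
--             if one_line[i] != '.':
--                 continue
--             t = i + 1 if i + 1 < end else start
--             out[i] = t if one_line[t] == '.' else i
--     return out
-- ===== Notes on version B (the rewrite author's own statement) =====
-- stated objective: alternative
-- what changed: Replaces the single stateful left-to-right scan (carrying left_index and writing each cell inline) by two passes: first build an explicit list of (start,end) segments delimited by spaces, then fill the '.' cells of each segment with a uniform wrap formula.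
import Mathlib
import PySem

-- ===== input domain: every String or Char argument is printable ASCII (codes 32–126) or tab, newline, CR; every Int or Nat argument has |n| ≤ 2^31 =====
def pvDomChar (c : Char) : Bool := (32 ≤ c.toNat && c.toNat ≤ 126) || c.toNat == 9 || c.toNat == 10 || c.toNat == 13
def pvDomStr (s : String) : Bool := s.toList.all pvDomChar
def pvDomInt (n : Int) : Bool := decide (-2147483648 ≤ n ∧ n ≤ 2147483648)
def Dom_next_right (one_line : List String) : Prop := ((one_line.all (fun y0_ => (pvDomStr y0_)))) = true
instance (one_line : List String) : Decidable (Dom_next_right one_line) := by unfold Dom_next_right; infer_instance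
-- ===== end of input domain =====

-- B replaces A's single stateful scan by two passes (collect space-delimited segments, then fill each
-- segment's '.' cells); same O(n) cost, alternative decomposition. Return values proved equal on all inputs.

-- ===== PORT A =====
-- Transliteration of A: one pass over enumerate(one_line), state (out, left_index).
-- nrA_dot is the body of A's `elif c == '.'` branch; `ln.getD (i+1) ""` / `pyGetD ln li' ""`
-- port in-range Python indexing (left_index is set before each use and i+1 < n is checked).
def nrA_dot (ln : List String) (n i : Nat) (out : List Int) (li' : Int) : List Int :=
  if i + 1 = n then
    let w := PySem.List.pyGetD ln li' ""
    if w = "." then out.set i li'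
    else if w = "#" then out.set i (i : Int)
    else out
  else
    let nc := ln.getD (i+1) ""
    if nc = "." then out.set i ((i : Int) + 1)
    else if nc = " " then
      let w := PySem.List.pyGetD ln li' ""
      if w = "." then out.set i li'
      else if w = "#" then out.set i (i : Int)
      else out
    else out.set i (i : Int)

def nrA_go (ln : List String) (n : Nat) : List String → Nat → List Int → Int → List Int
  | [], _, out, _ => out
  | c :: rest, i, out, li =>
    if c = " " then nrA_go ln n rest (i+1) out (-1)
    else if c = "." then
      let li' := if li = -1 then (i : Int) else li
      nrA_go ln n rest (i+1) (nrA_dot ln n i out li') li'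
    else if c = "#" then
      nrA_go ln n rest (i+1) out (if li = -1 then (i : Int) else li)
    else nrA_go ln n rest (i+1) out li

def next_right (one_line : List String) : List Int :=
  nrA_go one_line one_line.length one_line 0 (one_line.map (fun _ => (-1 : Int))) (-1)

-- ===== PORT B =====
-- Pass 1: collect (start, end) segments; start = first '.'/'#' after a space, end = next space / ln end.
def nrB_scan (ln : List String) : List String → Nat → List (Nat × Nat) → Option Nat → List (Nat × Nat) × Option Nat
  | [], _, segs, start => (segs, start)
  | c :: rest, i, segs, start =>
    if c = " " then
      match start with
      | some s => nrB_scan ln rest (i+1) (segs ++ [(s, i)]) none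
      | none => nrB_scan ln rest (i+1) segs none
    else if start = none ∧ (c = "." ∨ c = "#") then nrB_scan ln rest (i+1) segs (some i)
    else nrB_scan ln rest (i+1) segs start

-- the trailing `if start is not None: segments.append((start, n))`
def nrB_close (n : Nat) (p : List (Nat × Nat) × Option Nat) : List (Nat × Nat) :=
  match p.2 with
  | some s => p.1 ++ [(s, n)]
  | none => p.1

-- Pass 2 loop body: fill cell i of segment (s, e)
def nrB_step (ln : List String) (s e : Nat) (out : List Int) (i : Nat) : List Int :=
  if ln.getD i "" ≠ "." then out
  else
    let t := if i + 1 < e then i + 1 else s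
    out.set i (if ln.getD t "" = "." then (t : Int) else (i : Int))

-- `for i in range(start, end)` of pass 2
def nrB_fill_seg (ln : List String) (s e : Nat) (out : List Int) : List Int :=
  (List.range' s (e - s)).foldl (nrB_step ln s e) out

def next_right_alt (one_line : List String) : List Int :=
  let segs := nrB_close one_line.length (nrB_scan one_line one_line 0 [] none)
  segs.foldl (fun out se => nrB_fill_seg one_line se.1 se.2 out)
    (List.replicate one_line.length (-1 : Int))

-- ===== PRECONDITION & SPEC =====
def Spec_next_right (one_line : List String) (out : List Int) : Prop := out = next_right_alt one_line
instance (one_line : List String) (out : List Int) : Decidable (Spec_next_right one_line out) := by unfold Spec_next_right; infer_instance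

-- ===== CLAIM (what is proved, stated in full; the proofs are below) =====
def Claim_equal_next_right : Prop := ∀ (one_line : List String), Dom_next_right one_line → Spec_next_right one_line (next_right one_line)

-- ===== LEMMAS AND PROOFS =====

-- Python A's left_index before processing position k, as an Option.
def pvL (ln : List String) : Nat → Option Nat
  | 0 => none
  | k+1 =>
    if ln[k]?.getD "" = " " then none
    else match pvL ln k with
         | some s => some s
         | none => if ln[k]?.getD "" = "." ∨ ln[k]?.getD "" = "#" then some k else none

def pvOptInt : Option Nat → Int
  | none => -1
  | some s => (s : Int)

-- First index ≥ j holding a space, else the length.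
def pvE (ln : List String) (j : Nat) : Nat :=
  j + (ln.drop j).findIdx (fun c => c = " ")

-- The target cell of a '.' at j: the next cell, or the wrap start at the run's end.
def pvT (ln : List String) (j : Nat) : Nat :=
  if j + 1 < pvE ln (j+1) then j + 1 else (pvL ln j).getD j

-- The common pointwise specification of both programs.
def pvSpec (ln : List String) (j : Nat) : Int :=
  if ln[j]?.getD "" = "." then
    (if ln[pvT ln j]?.getD "" = "." then (pvT ln j : Int) else (j : Int))
  else -1

def pvSpecList (ln : List String) : List Int :=
  (List.range ln.length).map (pvSpec ln)

theorem pvSpecList_length (ln : List String) : (pvSpecList ln).length = ln.length := by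
  simp [pvSpecList]

theorem pvSpecList_get? (ln : List String) (j : Nat) (h : j < ln.length) :
    (pvSpecList ln)[j]? = some (pvSpec ln j) := by
  simp [pvSpecList, h]

theorem pv_lt_of_char (ln : List String) (s : Nat)
    (h : ln[s]?.getD "" = "." ∨ ln[s]?.getD "" = "#") : s < ln.length := by
  by_contra hge
  push_neg at hge
  rw [List.getElem?_eq_none (by omega)] at h
  rcases h with h | h <;> exact absurd h (by decide)

theorem pv_drop_cons (ln : List String) (j : Nat) (h : j < ln.length) :
    ln.drop j = (ln[j]?.getD "") :: ln.drop (j+1) := by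
  rw [List.drop_eq_getElem_cons h, List.getElem?_eq_getElem h]
  rfl

theorem pvL_char (ln : List String) : ∀ k s, pvL ln k = some s →
    s < k ∧ (ln[s]?.getD "" = "." ∨ ln[s]?.getD "" = "#") ∧ pvL ln s = none ∧
      (∀ j, s ≤ j → j < k → ln[j]?.getD "" ≠ " ") := by
  intro k
  induction k with
  | zero => intro s h; simp [pvL] at h
  | succ k ih =>
    intro s h
    simp only [pvL] at h
    by_cases hsp : ln[k]?.getD "" = " "
    · rw [if_pos hsp] at h; exact absurd h (by simp)
    · rw [if_neg hsp] at h
      rcases hLk : pvL ln k with _ | s'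
      · rw [hLk] at h
        by_cases hc : ln[k]?.getD "" = "." ∨ ln[k]?.getD "" = "#"
        · rw [if_pos hc] at h
          have hks : k = s := Option.some.inj h
          subst hks
          refine ⟨Nat.lt_succ_self k, hc, hLk, ?_⟩
          intro j h1 h2
          have : j = k := by omega
          subst this; exact hsp
        · rw [if_neg hc] at h; exact absurd h (by simp)
      · rw [hLk] at h
        have hss : s' = s := Option.some.inj h
        subst hss
        obtain ⟨h1, h2, h3, h4⟩ := ih s' hLk
        refine ⟨by omega, h2, h3, ?_⟩
        intro j hj1 hj2
        by_cases hjk : j = k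
        · subst hjk; exact hsp
        · exact h4 j hj1 (by omega)

theorem pvL_succ_start (ln : List String) (s : Nat)
    (h0 : pvL ln s = none) (hc : ln[s]?.getD "" = "." ∨ ln[s]?.getD "" = "#") :
    pvL ln (s+1) = some s := by
  have hsp : ln[s]?.getD "" ≠ " " := by
    intro hco
    rcases hc with h | h <;> exact absurd (hco.symm.trans h) (by decide)
  simp only [pvL]
  rw [if_neg hsp, h0]
  simp [hc]

theorem pvL_stable (ln : List String) (s : Nat) :
    ∀ i, pvL ln (s+1) = some s → (∀ j, s+1 ≤ j → j < i → ln[j]?.getD "" ≠ " ") →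
      s+1 ≤ i → pvL ln i = some s := by
  intro i
  induction i with
  | zero => intro _ _ h; omega
  | succ i ih =>
    intro h1 h2 h3
    by_cases hi : s + 1 = i + 1
    · rw [← hi]; exact h1
    · have hsi : s + 1 ≤ i := by omega
      have hLi : pvL ln i = some s := ih h1 (fun j a b => h2 j a (by omega)) hsi
      have hsp : ln[i]?.getD "" ≠ " " := h2 i hsi (by omega)
      simp only [pvL]
      rw [if_neg hsp, hLi]

theorem pvE_nil (ln : List String) (j : Nat) (h : ln.length ≤ j) : pvE ln j = j := by
  simp [pvE, List.drop_eq_nil_of_le h]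

theorem pvE_space (ln : List String) (j : Nat) (h : j < ln.length)
    (hs : ln[j]?.getD "" = " ") : pvE ln j = j := by
  simp [pvE, pv_drop_cons ln j h, List.findIdx_cons, hs]

theorem pvE_step (ln : List String) (j : Nat) (h : j < ln.length)
    (hs : ln[j]?.getD "" ≠ " ") : pvE ln j = pvE ln (j+1) := by
  simp [pvE, pv_drop_cons ln j h, List.findIdx_cons, hs]
  omega

theorem pvE_seg (ln : List String) (e : Nat) (he : e ≤ ln.length)
    (hend : e = ln.length ∨ ln[e]?.getD "" = " ") :
    ∀ m a, a + m = e → (∀ j, a ≤ j → j < e → ln[j]?.getD "" ≠ " ") → pvE ln a = e := by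
  intro m
  induction m with
  | zero =>
    intro a ha _
    have hae : a = e := by omega
    subst hae
    rcases hend with h | h
    · exact pvE_nil ln a (by omega)
    · rcases Nat.lt_or_ge a ln.length with hlt | hge
      · exact pvE_space ln a hlt h
      · exact pvE_nil ln a hge
  | succ m ih =>
    intro a ha hnsp
    have ha' : a < e := by omega
    have hsp : ln[a]?.getD "" ≠ " " := hnsp a (by omega) ha'
    rw [pvE_step ln a (by omega) hsp]
    exact ih (a+1) (by omega) (fun j h1 h2 => hnsp j (by omega) h2)

-- the wrap-start character is always '.' or '#', and in range
theorem pvS_facts (ln : List String) (k : Nat) (hk : k < ln.length)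
    (hdot : ln[k]?.getD "" = ".") :
    (pvL ln k).getD k ≤ k ∧
      (ln[(pvL ln k).getD k]?.getD "" = "." ∨ ln[(pvL ln k).getD k]?.getD "" = "#") := by
  rcases hL : pvL ln k with _ | s'
  · simp only [Option.getD]
    exact ⟨le_refl k, Or.inl hdot⟩
  · obtain ⟨h1, h2, _, _⟩ := pvL_char ln k s' hL
    simp only [Option.getD]
    exact ⟨by omega, h2⟩

-- ===== A-side: the '.' branch writes the spec value =====

theorem nrA_dot_spec (ln : List String) (k : Nat) (out : List Int) (hk : k < ln.length)
    (hck : ln[k]?.getD "" = ".") :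
    nrA_dot ln ln.length k out (((pvL ln k).getD k : Nat) : Int) = out.set k (pvSpec ln k) := by
  obtain ⟨hsle, hschar⟩ := pvS_facts ln k hk hck
  have hsvlt : (pvL ln k).getD k < ln.length := pv_lt_of_char ln _ hschar
  have hwrap : PySem.List.pyGetD ln (((pvL ln k).getD k : Nat) : Int) ""
      = ln[(pvL ln k).getD k]?.getD "" := by
    rw [PySem.List.pyGetD_natCast]
    rw [List.getD_eq_getElem?_getD]
  unfold nrA_dot
  rw [hwrap]
  by_cases hend : k + 1 = ln.length
  · have hnt : ¬ (k + 1 < pvE ln (k+1)) := by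
      have := pvE_nil ln (k+1) (by omega)
      omega
    have hT : pvT ln k = (pvL ln k).getD k := by
      simp only [pvT, if_neg hnt]
    rw [if_pos hend]
    rcases hschar with hc | hc
    · rw [if_pos hc]
      simp [pvSpec, hck, hT, hc]
    · have hnd : ln[(pvL ln k).getD k]?.getD "" ≠ "." := by rw [hc]; decide
      rw [if_neg hnd, if_pos hc]
      simp [pvSpec, hck, hT, hc]
  · have hk1 : k + 1 < ln.length := by omega
    rw [if_neg hend]
    rw [List.getD_eq_getElem?_getD]
    by_cases hnc : ln[k+1]?.getD "" = "."
    · have ht : k + 1 < pvE ln (k+1) := by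
        have h1 := pvE_step ln (k+1) hk1 (by rw [hnc]; decide)
        have h2 : k + 1 + 1 ≤ pvE ln (k + 1 + 1) := Nat.le_add_right _ _
        omega
      have hT : pvT ln k = k + 1 := by simp only [pvT, if_pos ht]
      rw [if_pos hnc]
      simp [pvSpec, hck, hT, hnc]
    · by_cases hnsp : ln[k+1]?.getD "" = " "
      · have hnt : ¬ (k + 1 < pvE ln (k+1)) := by
          have := pvE_space ln (k+1) hk1 hnsp
          omega
        have hT : pvT ln k = (pvL ln k).getD k := by
          simp only [pvT, if_neg hnt]
        rw [if_neg hnc, if_pos hnsp]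
        rcases hschar with hc | hc
        · rw [if_pos hc]
          simp [pvSpec, hck, hT, hc]
        · have hnd : ln[(pvL ln k).getD k]?.getD "" ≠ "." := by rw [hc]; decide
          rw [if_neg hnd, if_pos hc]
          simp [pvSpec, hck, hT, hc]
      · have ht : k + 1 < pvE ln (k+1) := by
          have h1 := pvE_step ln (k+1) hk1 hnsp
          have h2 : k + 1 + 1 ≤ pvE ln (k + 1 + 1) := Nat.le_add_right _ _
          omega
        have hT : pvT ln k = k + 1 := by simp only [pvT, if_pos ht]
        rw [if_neg hnc, if_neg hnsp]
        simp [pvSpec, hck, hT, hnc]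

theorem nrA_go_spec (ln : List String) :
    ∀ (rest : List String) (k : Nat) (out : List Int) (li : Int), rest = ln.drop k → out.length = ln.length →
      li = pvOptInt (pvL ln k) →
      (∀ j, j < k → out[j]? = some (pvSpec ln j)) →
      (∀ j, k ≤ j → j < ln.length → out[j]? = some (-1)) →
      nrA_go ln ln.length rest k out li = pvSpecList ln := by
  intro rest
  induction rest with
  | nil =>
    intro k out li hdrop hlen _ hpre _
    have hk : ln.length ≤ k := by
      by_contra h
      push_neg at h
      rw [pv_drop_cons ln k h] at hdrop
      exact absurd hdrop (by simp)
    simp only [nrA_go]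
    apply List.ext_getElem?
    intro j
    rcases Nat.lt_or_ge j ln.length with hj | hj
    · rw [hpre j (by omega), pvSpecList_get? ln j hj]
    · rw [List.getElem?_eq_none (by omega),
        List.getElem?_eq_none (by rw [pvSpecList_length]; omega)]
  | cons c rest ih =>
    intro k out li hdrop hlen hli hpre hpost
    have hk : k < ln.length := by
      by_contra h
      push_neg at h
      rw [List.drop_eq_nil_of_le h] at hdrop
      exact absurd hdrop (by simp)
    rw [pv_drop_cons ln k hk] at hdrop
    obtain ⟨hck, hdrop'⟩ := List.cons.inj hdrop
    by_cases hsp : c = " "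
    · -- space: reset
      have hckv : ln[k]?.getD "" = " " := by rw [← hck, hsp]
      simp only [nrA_go, if_pos hsp]
      apply ih (k+1) out (-1) hdrop' hlen
      · have : pvL ln (k+1) = none := by simp only [pvL]; rw [if_pos hckv]
        rw [this]; rfl
      · intro j hj
        by_cases hjk : j = k
        · subst hjk
          rw [hpost j (by omega) hk]
          have : ln[j]?.getD "" ≠ "." := by rw [hckv]; decide
          simp [pvSpec, this]
        · exact hpre j (by omega)
      · intro j h1 h2; exact hpost j (by omega) h2
    · by_cases hdot : c = "."
      · -- the '.' case
        have hckv : ln[k]?.getD "" = "." := by rw [← hck, hdot]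
        have hL1 : pvL ln (k+1) = some ((pvL ln k).getD k) := by
          have hspv : ln[k]?.getD "" ≠ " " := by rw [hckv]; decide
          rcases hL : pvL ln k with _ | s'
          · simp only [pvL]
            rw [if_neg hspv, hL]
            simp [hckv]
          · simp only [pvL]
            rw [if_neg hspv, hL]
            simp
        have hli' : (if li = -1 then (k : Int) else li) = (((pvL ln k).getD k : Nat) : Int) := by
          rcases hL : pvL ln k with _ | s'
          · rw [hli, hL]
            simp [pvOptInt]
          · rw [hli, hL]
            simp only [pvOptInt]
            rw [if_neg (by omega), Option.getD_some]
        simp only [nrA_go, if_neg hsp, if_pos hdot]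
        rw [hli', nrA_dot_spec ln k out hk hckv]
        apply ih (k+1) _ _ hdrop' (by simp [hlen])
        · rw [hL1]; rfl
        · intro j hj
          rw [List.getElem?_set]
          by_cases hjk : k = j
          · subst hjk
            rw [if_pos rfl, if_pos (by omega)]
          · rw [if_neg hjk]
            exact hpre j (by omega)
        · intro j h1 h2
          rw [List.getElem?_set]
          have : k ≠ j := by omega
          rw [if_neg this]
          exact hpost j (by omega) h2
      · by_cases hhash : c = "#"
        · have hckv : ln[k]?.getD "" = "#" := by rw [← hck, hhash]
          have hspv : ln[k]?.getD "" ≠ " " := by rw [hckv]; decide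
          simp only [nrA_go, if_neg hsp, if_neg hdot, if_pos hhash]
          apply ih (k+1) out _ hdrop' hlen
          · rcases hL : pvL ln k with _ | s'
            · have hnone : li = -1 := by rw [hli, hL]; rfl
              have : pvL ln (k+1) = some k := by
                simp only [pvL]
                rw [if_neg hspv, hL]
                simp [hckv]
              rw [this, if_pos hnone]
              rfl
            · have hlv : li = (s' : Int) := by rw [hli, hL]; rfl
              have hne : li ≠ -1 := by rw [hlv]; omega
              have : pvL ln (k+1) = some s' := by
                simp only [pvL]
                rw [if_neg hspv, hL]
              rw [this, if_neg hne, hlv]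
              rfl
          · intro j hj
            by_cases hjk : j = k
            · subst hjk
              rw [hpost j (by omega) hk]
              have : ln[j]?.getD "" ≠ "." := by rw [hckv]; decide
              simp [pvSpec, this]
            · exact hpre j (by omega)
          · intro j h1 h2; exact hpost j (by omega) h2
        · -- other character: state unchanged
          have hspv : ln[k]?.getD "" ≠ " " := by rw [← hck]; exact hsp
          simp only [nrA_go, if_neg hsp, if_neg hdot, if_neg hhash]
          apply ih (k+1) out li hdrop' hlen
          · have : pvL ln (k+1) = pvL ln k := by
              simp only [pvL]
              rw [if_neg (by rw [← hck]; intro h; exact hsp h)]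
              rcases hL : pvL ln k with _ | s'
              · rw [if_neg (by rw [← hck]; intro h; rcases h with h | h; exact hdot h; exact hhash h)]
              · rfl
            rw [this]; exact hli
          · intro j hj
            by_cases hjk : j = k
            · subst hjk
              rw [hpost j (by omega) hk]
              have : ln[j]?.getD "" ≠ "." := by rw [← hck]; intro h; exact hdot h
              simp [pvSpec, this]
            · exact hpre j (by omega)
          · intro j h1 h2; exact hpost j (by omega) h2

-- ===== B-side =====

def pvSegOK (ln : List String) (s e : Nat) : Prop :=
  s < e ∧ e ≤ ln.length ∧ pvL ln s = none ∧
    (ln[s]?.getD "" = "." ∨ ln[s]?.getD "" = "#") ∧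
    (∀ j, s ≤ j → j < e → ln[j]?.getD "" ≠ " ") ∧
    (e = ln.length ∨ ln[e]?.getD "" = " ")

-- inside a good segment, B's per-cell value is the spec value
theorem pvSeg_spec (ln : List String) (s e i : Nat) (hseg : pvSegOK ln s e)
    (hs : s ≤ i) (hie : i < e) (hdot : ln[i]?.getD "" = ".") :
    (if ln.getD (if i + 1 < e then i + 1 else s) "" = "."
      then ((if i + 1 < e then i + 1 else s : Nat) : Int) else (i : Int)) = pvSpec ln i := by
  obtain ⟨h1, h2, h3, h4, h5, h6⟩ := hseg
  have hLs : (pvL ln i).getD i = s := by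
    by_cases his : i = s
    · subst his; rw [h3]; rfl
    · have : pvL ln i = some s := by
        apply pvL_stable ln s i (pvL_succ_start ln s h3 h4)
        · intro j a b; exact h5 j (by omega) (by omega)
        · omega
      rw [this]; rfl
  have hE : pvE ln (i+1) = e := by
    apply pvE_seg ln e h2 h6 (e - (i+1)) (i+1) (by omega)
    intro j a b; exact h5 j (by omega) b
  have hT : pvT ln i = if i + 1 < e then i + 1 else s := by
    simp only [pvT, hE, hLs]
  simp [pvSpec, hdot, hT, List.getD_eq_getElem?_getD]

theorem nrB_step_get (ln : List String) (s e : Nat) (hseg : pvSegOK ln s e)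
    (i : Nat) (hs : s ≤ i) (hie : i < e) (out : List Int) (hlen : out.length = ln.length)
    (j : Nat) :
    (nrB_step ln s e out i)[j]? =
      if i = j ∧ ln[i]?.getD "" = "." then some (pvSpec ln i) else out[j]? := by
  unfold nrB_step
  by_cases hdot : ln[i]?.getD "" = "."
  · have hnd : ¬ (ln.getD i "" ≠ ".") := by
      rw [List.getD_eq_getElem?_getD]; simp [hdot]
    rw [if_neg hnd]
    simp only []
    rw [pvSeg_spec ln s e i hseg hs hie hdot]
    rw [List.getElem?_set]
    by_cases hij : i = j
    · subst hij
      have : i < out.length := by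
        have := hseg.2.1
        omega
      rw [if_pos rfl, if_pos this, if_pos ⟨rfl, hdot⟩]
    · rw [if_neg hij, if_neg (by rintro ⟨h, _⟩; exact hij h)]
  · have hd : ln.getD i "" ≠ "." := by
      rw [List.getD_eq_getElem?_getD]; exact hdot
    rw [if_pos hd, if_neg (by rintro ⟨_, h⟩; exact hdot h)]

theorem nrB_step_length (ln : List String) (s e : Nat) (out : List Int) (i : Nat) :
    (nrB_step ln s e out i).length = out.length := by
  unfold nrB_step
  split_ifs <;> simp

theorem nrB_fill_go_spec (ln : List String) (s e : Nat) (hseg : pvSegOK ln s e) :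
    ∀ m i0 out, s ≤ i0 → i0 + m = e → out.length = ln.length →
      ∀ j, ((List.range' i0 m).foldl (nrB_step ln s e) out)[j]? =
        if i0 ≤ j ∧ j < e ∧ ln[j]?.getD "" = "." then some (pvSpec ln j) else out[j]? := by
  intro m
  induction m with
  | zero =>
    intro i0 out hs he hlen j
    simp only [List.range', List.foldl_nil]
    rw [if_neg (by rintro ⟨a, b, _⟩; omega)]
  | succ m ih =>
    intro i0 out hs he hlen j
    rw [List.range'_succ, List.foldl_cons]
    rw [ih (i0+1) (nrB_step ln s e out i0) (by omega) (by omega)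
      (by rw [nrB_step_length]; exact hlen) j]
    rw [nrB_step_get ln s e hseg i0 hs (by omega) out hlen j]
    by_cases h1 : (i0+1) ≤ j ∧ j < e ∧ ln[j]?.getD "" = "."
    · rw [if_pos h1, if_pos ⟨by omega, h1.2.1, h1.2.2⟩]
    · rw [if_neg h1]
      by_cases h2 : i0 = j ∧ ln[i0]?.getD "" = "."
      · obtain ⟨h2a, h2b⟩ := h2
        subst h2a
        rw [if_pos ⟨rfl, h2b⟩, if_pos ⟨le_refl i0, by omega, h2b⟩]
      · rw [if_neg h2]
        by_cases h3 : i0 ≤ j ∧ j < e ∧ ln[j]?.getD "" = "."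
        · exfalso
          have hij : i0 = j := by
            rcases Nat.lt_or_ge j (i0+1) with h | h
            · omega
            · exact absurd ⟨h, h3.2.1, h3.2.2⟩ h1
          exact h2 ⟨hij, hij ▸ h3.2.2⟩
        · rw [if_neg h3]

theorem nrB_fill_seg_spec (ln : List String) (s e : Nat) (hseg : pvSegOK ln s e)
    (out : List Int) (hlen : out.length = ln.length) (j : Nat) :
    (nrB_fill_seg ln s e out)[j]? =
      if s ≤ j ∧ j < e ∧ ln[j]?.getD "" = "." then some (pvSpec ln j) else out[j]? := by
  unfold nrB_fill_seg
  exact nrB_fill_go_spec ln s e hseg (e - s) s out (le_refl s) (by have := hseg.1; omega) hlen j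

theorem nrB_fill_seg_length (ln : List String) (s e : Nat) (out : List Int) :
    (nrB_fill_seg ln s e out).length = out.length := by
  unfold nrB_fill_seg
  generalize List.range' s (e - s) = l
  induction l generalizing out with
  | nil => rfl
  | cons i rest ih =>
    rw [List.foldl_cons, ih, nrB_step_length]

theorem nrB_scan_spec (ln : List String) :
    ∀ (rest : List String) (k : Nat) (segs : List (Nat × Nat)) (start : Option Nat), rest = ln.drop k → start = pvL ln k →
      (∀ se ∈ segs, pvSegOK ln se.1 se.2 ∧ se.2 ≤ k) →
      (∀ j, j < k → ln[j]?.getD "" = "." →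
        (∃ se ∈ segs, se.1 ≤ j ∧ j < se.2) ∨ (∃ s, start = some s ∧ s ≤ j)) →
      (∀ se ∈ nrB_close ln.length (nrB_scan ln rest k segs start), pvSegOK ln se.1 se.2) ∧
      (∀ j, j < ln.length → ln[j]?.getD "" = "." →
        ∃ se ∈ nrB_close ln.length (nrB_scan ln rest k segs start), se.1 ≤ j ∧ j < se.2) := by
  intro rest
  induction rest with
  | nil =>
    intro k segs start hdrop hstart hI1 hI2
    have hk : ln.length ≤ k := by
      by_contra h
      push_neg at h
      rw [pv_drop_cons ln k h] at hdrop
      exact absurd hdrop (by simp)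
    simp only [nrB_scan]
    rcases hst : start with _ | s
    · simp only [nrB_close]
      constructor
      · intro se h; exact (hI1 se h).1
      · intro j hj hdot
        rcases hI2 j (by omega) hdot with ⟨se, hm, ha, hb⟩ | ⟨s, hsome, _⟩
        · exact ⟨se, hm, ha, hb⟩
        · rw [hst] at hsome; exact absurd hsome (by simp)
    · rw [hst] at hstart
      obtain ⟨h1, h2, h3, h4⟩ := pvL_char ln k s hstart.symm
      have hsn : s < ln.length := pv_lt_of_char ln s h2
      have hOK : pvSegOK ln s ln.length :=
        ⟨hsn, le_refl _, h3, h2, fun j a b => h4 j a (by omega), Or.inl rfl⟩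
      simp only [nrB_close]
      constructor
      · intro se hm
        rcases List.mem_append.mp hm with hm | hm
        · exact (hI1 se hm).1
        · rcases List.mem_singleton.mp hm with rfl
          exact hOK
      · intro j hj hdot
        rcases hI2 j (by omega) hdot with ⟨se, hm, ha, hb⟩ | ⟨s', hsome, hle⟩
        · exact ⟨se, List.mem_append_left _ hm, ha, hb⟩
        · rw [hst] at hsome
          have : s = s' := Option.some.inj hsome
          subst this
          exact ⟨(s, ln.length), List.mem_append_right _ (List.mem_singleton.mpr rfl), hle, hj⟩
  | cons c rest ih =>
    intro k segs start hdrop hstart hI1 hI2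
    have hk : k < ln.length := by
      by_contra h
      push_neg at h
      rw [List.drop_eq_nil_of_le h] at hdrop
      exact absurd hdrop (by simp)
    rw [pv_drop_cons ln k hk] at hdrop
    obtain ⟨hck, hdrop'⟩ := List.cons.inj hdrop
    by_cases hsp : c = " "
    · have hckv : ln[k]?.getD "" = " " := by rw [← hck, hsp]
      have hL1 : pvL ln (k+1) = none := by simp only [pvL]; rw [if_pos hckv]
      simp only [nrB_scan, if_pos hsp]
      rcases hst : start with _ | s
      · apply ih (k+1) segs none hdrop' hL1.symm
        · intro se hm
          obtain ⟨ha, hb⟩ := hI1 se hm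
          exact ⟨ha, by omega⟩
        · intro j hj hdot
          by_cases hjk : j = k
          · subst hjk; exact absurd hdot (by rw [hckv]; decide)
          · rcases hI2 j (by omega) hdot with ⟨se, hm, ha, hb⟩ | ⟨s', hsome, _⟩
            · exact Or.inl ⟨se, hm, ha, hb⟩
            · rw [hst] at hsome; exact absurd hsome (by simp)
      · rw [hst] at hstart
        obtain ⟨h1, h2, h3, h4⟩ := pvL_char ln k s hstart.symm
        have hOK : pvSegOK ln s k :=
          ⟨h1, by omega, h3, h2, h4, Or.inr hckv⟩
        apply ih (k+1) (segs ++ [(s, k)]) none hdrop' hL1.symm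
        · intro se hm
          rcases List.mem_append.mp hm with hm | hm
          · obtain ⟨ha, hb⟩ := hI1 se hm
            exact ⟨ha, by omega⟩
          · rcases List.mem_singleton.mp hm with rfl
            exact ⟨hOK, by omega⟩
        · intro j hj hdot
          by_cases hjk : j = k
          · subst hjk; exact absurd hdot (by rw [hckv]; decide)
          · rcases hI2 j (by omega) hdot with ⟨se, hm, ha, hb⟩ | ⟨s', hsome, hle⟩
            · exact Or.inl ⟨se, List.mem_append_left _ hm, ha, hb⟩
            · rw [hst] at hsome
              have : s = s' := Option.some.inj hsome
              subst this
              exact Or.inl ⟨(s, k), List.mem_append_right _ (List.mem_singleton.mpr rfl), hle, by omega⟩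
    · have hspv : ln[k]?.getD "" ≠ " " := by rw [← hck]; intro h; exact hsp h
      by_cases hcond : start = none ∧ (c = "." ∨ c = "#")
      · obtain ⟨hst, hc⟩ := hcond
        have hckv : ln[k]?.getD "" = "." ∨ ln[k]?.getD "" = "#" := by
          rcases hc with h | h
          · exact Or.inl (by rw [← hck, h])
          · exact Or.inr (by rw [← hck, h])
        have hLk : pvL ln k = none := by rw [← hstart, hst]
        have hL1 : pvL ln (k+1) = some k := by
          simp only [pvL]
          rw [if_neg hspv, hLk]
          simp [hckv]
        simp only [nrB_scan, if_neg hsp, if_pos (⟨hst, hc⟩ : start = none ∧ (c = "." ∨ c = "#"))]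
        apply ih (k+1) segs (some k) hdrop' hL1.symm
        · intro se hm
          obtain ⟨ha, hb⟩ := hI1 se hm
          exact ⟨ha, by omega⟩
        · intro j hj hdot
          by_cases hjk : j = k
          · subst hjk
            exact Or.inr ⟨j, rfl, le_refl j⟩
          · rcases hI2 j (by omega) hdot with ⟨se, hm, ha, hb⟩ | ⟨s', hsome, _⟩
            · exact Or.inl ⟨se, hm, ha, hb⟩
            · rw [hst] at hsome; exact absurd hsome (by simp)
      · have hL1 : pvL ln (k+1) = pvL ln k := by
          simp only [pvL]
          rw [if_neg hspv]
          rcases hL : pvL ln k with _ | s'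
          · rw [if_neg ?_]
            rw [hL] at hstart
            intro hc
            apply hcond
            refine ⟨hstart, ?_⟩
            rcases hc with h | h
            · exact Or.inl (by rw [← hck] at h; exact h)
            · exact Or.inr (by rw [← hck] at h; exact h)
          · rfl
        simp only [nrB_scan, if_neg hsp, if_neg hcond]
        apply ih (k+1) segs start hdrop' (by rw [hL1, hstart])
        · intro se hm
          obtain ⟨ha, hb⟩ := hI1 se hm
          exact ⟨ha, by omega⟩
        · intro j hj hdot
          by_cases hjk : j = k
          · subst hjk
            rcases hst : start with _ | s'
            · exfalso
              apply hcond
              refine ⟨hst, ?_⟩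
              left
              rw [hck, hdot]
            · rw [hst] at hstart
              obtain ⟨h1, _, _, _⟩ := pvL_char ln j s' hstart.symm
              exact Or.inr ⟨s', rfl, by omega⟩
          · rcases hI2 j (by omega) hdot with ⟨se, hm, ha, hb⟩ | ⟨s', hsome, hle⟩
            · exact Or.inl ⟨se, hm, ha, hb⟩
            · exact Or.inr ⟨s', hsome, hle⟩

theorem nrB_fold_segs (ln : List String) :
    ∀ (segs : List (Nat × Nat)) (out : List Int), out.length = ln.length →
      (∀ j, j < ln.length → out[j]? = some (pvSpec ln j) ∨ out[j]? = some (-1)) →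
      (∀ j, j < ln.length → ln[j]?.getD "" = "." →
        ((∃ se ∈ segs, se.1 ≤ j ∧ j < se.2) ∨ out[j]? = some (pvSpec ln j))) →
      (∀ se ∈ segs, pvSegOK ln se.1 se.2) →
      segs.foldl (fun out se => nrB_fill_seg ln se.1 se.2 out) out = pvSpecList ln := by
  intro segs
  induction segs with
  | nil =>
    intro out hlen hinit hcov _
    simp only [List.foldl_nil]
    apply List.ext_getElem?
    intro j
    rcases Nat.lt_or_ge j ln.length with hj | hj
    · rw [pvSpecList_get? ln j hj]
      by_cases hdot : ln[j]?.getD "" = "."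
      · rcases hcov j hj hdot with ⟨se, h, _⟩ | h
        · exact absurd h (by simp)
        · exact h
      · rcases hinit j hj with h | h
        · exact h
        · rw [h]
          simp [pvSpec, hdot]
    · rw [List.getElem?_eq_none (by omega),
        List.getElem?_eq_none (by rw [pvSpecList_length]; omega)]
  | cons se rest ih =>
    intro out hlen hinit hcov hok
    simp only [List.foldl_cons]
    have hse := hok se List.mem_cons_self
    have hchar := nrB_fill_seg_spec ln se.1 se.2 hse out hlen
    apply ih
    · rw [nrB_fill_seg_length]; exact hlen
    · intro j hj
      rw [hchar j]
      split_ifs with h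
      · exact Or.inl rfl
      · exact hinit j hj
    · intro j hj hdot
      rw [hchar j]
      rcases hcov j hj hdot with ⟨se', hmem, ha, hb⟩ | h
      · rcases List.mem_cons.mp hmem with heq | hmem'
        · subst heq
          rw [if_pos ⟨ha, hb, hdot⟩]
          exact Or.inr rfl
        · exact Or.inl ⟨se', hmem', ha, hb⟩
      · split_ifs with hc
        · exact Or.inr rfl
        · exact Or.inr h
    · intro se' h; exact hok se' (List.mem_cons_of_mem _ h)

theorem next_right_alt_eq (ln : List String) : next_right_alt ln = pvSpecList ln := by
  have hscan := nrB_scan_spec ln ln 0 [] none (by simp) (by simp [pvL])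
    (by intro se h; exact absurd h (by simp)) (by intro j h; omega)
  obtain ⟨hok, hcov⟩ := hscan
  unfold next_right_alt
  apply nrB_fold_segs ln _ _ (by simp)
  · intro j hj
    right
    simp [hj]
  · intro j hj hdot
    exact Or.inl (hcov j hj hdot)
  · exact hok

-- ===== VERDICT (by name: the statement is the Claim_ definition above) =====
theorem next_right_spec : Claim_equal_next_right := by
  intro ln _
  unfold Spec_next_right
  rw [next_right_alt_eq]
  unfold next_right
  apply nrA_go_spec ln ln 0 _ _ (by simp) (by simp) (by rfl)
  · intro j hj; omega
  · intro j _ hj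
    simp [hj]
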